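-- pv_equiv track=rewrite | github.com/razib764/Treelib | junk.py | cdr
-- ===== SOURCE A (Python) =====
-- def cdr(alpha,a1,a2):
--     i1 = alpha.index(a1) #Manages the indices
--     i2 = alpha.index(a2)
--     if i2 > i1:
--         #this is the case where the first element appears earlier in the list
--         i1 += 1 #rotate each element after a1
--         while i2 >= i1: #rotation step
--             k1 = alpha[i1]
--             k2 = alpha[i2]
--             alpha[i1] = -k2
--             alpha[i2] = -k1
--             i1 += 1
--             i2 -= 1
--         return (alpha)
--     elif i1 > i2:
--         #this is the case where the first element appears later in the list
--         i1 -= 1 #rotate every element after a2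
--         while i1 >= i2: #rotation step
--             k1 = alpha[i1]
--             k2 = alpha[i2]
--             alpha[i1] = -k2
--             alpha[i2] = -k1
--             i2 += 1
--             i1 -= 1
--         return (alpha)
-- ===== SOURCE B (Python) =====
-- def cdr(alpha, a1, a2):
--     i1 = alpha.index(a1)
--     i2 = alpha.index(a2)
--     if i1 == i2:
--         return None
--     lo, hi = (i1 + 1, i2) if i2 > i1 else (i2, i1 - 1)
--     alpha[lo:hi + 1] = [-x for x in reversed(alpha[lo:hi + 1])]
--     return alpha
-- ===== Notes on version B (the rewrite author's own statement) =====
-- stated objective: simpler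
-- what changed: Replaces A's two-pointer inward swap-and-negate while loops (one per direction) with computing the segment bounds once and a single slice assignment of the reversed, negated slice.
-- outside the precondition, e.g. on cdr([1, 2], 1, 1): A returns None, B returns None
import Mathlib
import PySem

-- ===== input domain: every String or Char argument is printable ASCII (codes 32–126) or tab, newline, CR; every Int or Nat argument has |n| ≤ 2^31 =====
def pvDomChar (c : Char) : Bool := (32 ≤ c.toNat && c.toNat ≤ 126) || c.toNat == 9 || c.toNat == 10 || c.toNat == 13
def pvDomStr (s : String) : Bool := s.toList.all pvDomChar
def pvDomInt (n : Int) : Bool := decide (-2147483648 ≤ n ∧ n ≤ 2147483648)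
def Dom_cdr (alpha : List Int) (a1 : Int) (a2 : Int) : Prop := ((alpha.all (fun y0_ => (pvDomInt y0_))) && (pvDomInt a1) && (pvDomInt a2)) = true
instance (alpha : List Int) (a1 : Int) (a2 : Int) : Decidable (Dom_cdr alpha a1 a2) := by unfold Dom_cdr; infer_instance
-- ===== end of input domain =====

-- B computes the segment bounds once and rebuilds the list with a single reversed-negated
-- slice assignment instead of A's two inward swap-and-negate while loops; both Pythons mutate
-- alpha in place the same way, the equivalence proved here is about the returned value.


-- ===== PORT A =====
-- first while loop: while i2 >= i1: swap-and-negate alpha[i1], alpha[i2]; i1 += 1; i2 -= 1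
-- (indices are always in range when the caller satisfies Pre_cdr, so the pyGet? default
-- and the toNat in List.set are never exercised on admitted inputs)
def cdrLoop1 (alpha : List Int) (i1 i2 : Int) : List Int :=
  if i2 ≥ i1 then
    let k1 := (PySem.List.pyGet? alpha i1).getD 0
    let k2 := (PySem.List.pyGet? alpha i2).getD 0
    cdrLoop1 ((alpha.set i1.toNat (-k2)).set i2.toNat (-k1)) (i1 + 1) (i2 - 1)
  else alpha
termination_by (i2 + 1 - i1).toNat
decreasing_by omega

-- second while loop: while i1 >= i2: swap-and-negate; i2 += 1; i1 -= 1
def cdrLoop2 (alpha : List Int) (i1 i2 : Int) : List Int :=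
  if i1 ≥ i2 then
    let k1 := (PySem.List.pyGet? alpha i1).getD 0
    let k2 := (PySem.List.pyGet? alpha i2).getD 0
    cdrLoop2 ((alpha.set i1.toNat (-k2)).set i2.toNat (-k1)) (i1 - 1) (i2 + 1)
  else alpha
termination_by (i1 + 1 - i2).toNat
decreasing_by omega

def cdr (alpha : List Int) (a1 : Int) (a2 : Int) : List Int :=
  match PySem.List.index? alpha a1, PySem.List.index? alpha a2 with
  | some i1, some i2 =>
    if (i2 : Int) > (i1 : Int) then cdrLoop1 alpha ((i1 : Int) + 1) (i2 : Int)
    else if (i1 : Int) > (i2 : Int) then cdrLoop2 alpha ((i1 : Int) - 1) (i2 : Int)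
    else alpha            -- Python A returns None here (i1 = i2); excluded by Pre_cdr
  | _, _ => alpha         -- Python A raises ValueError (.index on a missing value); excluded by Pre_cdr

-- ===== PORT B =====
def cdr_alt (alpha : List Int) (a1 : Int) (a2 : Int) : List Int :=
  match PySem.List.index? alpha a1 with
  | none => alpha         -- Source B raises ValueError; excluded by Pre_cdr
  | some i1 =>
    match PySem.List.index? alpha a2 with
    | none => alpha       -- Source B raises ValueError; excluded by Pre_cdr
    | some i2 =>
      if i1 = i2 then alpha -- Source B returns None here; excluded by Pre_cdr
      else
        let lo : Nat := if i2 > i1 then i1 + 1 else i2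
        let hi : Nat := if i2 > i1 then i2 else i1 - 1
        -- alpha[lo:hi+1] = [-x for x in reversed(alpha[lo:hi+1])]; return alpha
        alpha.take lo
          ++ ((PySem.List.slice alpha (some (lo : Int)) (some ((hi : Int) + 1))).reverse.map (fun x => -x))
          ++ alpha.drop (hi + 1)

-- ===== PRECONDITION & SPEC =====
-- Pre_ excludes inputs where A raises ValueError (a1 or a2 not in alpha) and inputs where A
-- returns None instead of a list (a1 = a2 present in alpha, so both indices coincide).
def Pre_cdr (alpha : List Int) (a1 : Int) (a2 : Int) : Prop :=
  a1 ∈ alpha ∧ a2 ∈ alpha ∧ a1 ≠ a2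
instance (alpha : List Int) (a1 : Int) (a2 : Int) : Decidable (Pre_cdr alpha a1 a2) := by
  unfold Pre_cdr; infer_instance

def pvWitness_cdr : List Int × Int × Int := ([1, 2, 3], 1, 3)

def Spec_cdr (alpha : List Int) (a1 : Int) (a2 : Int) (out : List Int) : Prop := out = cdr_alt alpha a1 a2
instance (alpha : List Int) (a1 : Int) (a2 : Int) (out : List Int) : Decidable (Spec_cdr alpha a1 a2 out) := by unfold Spec_cdr; infer_instance

-- ===== CLAIM (what is proved, stated in full; the proofs are below) =====
def Claim_equal_cdr : Prop := ∀ (alpha : List Int) (a1 : Int) (a2 : Int), Dom_cdr alpha a1 a2 → Pre_cdr alpha a1 a2 → Spec_cdr alpha a1 a2 (cdr alpha a1 a2)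

-- ===== LEMMAS AND PROOFS =====

theorem getD_set_int (l : List Int) (i j : Nat) (v : Int) (hi : i < l.length) :
    (l.set i v).getD j 0 = if j = i then v else l.getD j 0 := by
  rw [List.getD_eq_getElem?_getD, List.getD_eq_getElem?_getD, List.getElem?_set]
  split_ifs with h1 h2 <;> first | rfl | omega

theorem ext_getD (l1 l2 : List Int) (hlen : l1.length = l2.length)
    (h : ∀ j, j < l1.length → l1.getD j 0 = l2.getD j 0) : l1 = l2 := by
  apply List.ext_getElem hlen
  intro i h1 h2
  have hh := h i h1
  rwa [List.getD_eq_getElem l1 0 h1, List.getD_eq_getElem l2 0 h2] at hh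

theorem cdrLoop1_length (alpha : List Int) (i1 i2 : Int) :
    (cdrLoop1 alpha i1 i2).length = alpha.length := by
  fun_induction cdrLoop1 alpha i1 i2 with
  | case1 a i1 i2 h k1 k2 ih => simpa using ih
  | case2 => rfl

theorem cdrLoop2_length (alpha : List Int) (i1 i2 : Int) :
    (cdrLoop2 alpha i1 i2).length = alpha.length := by
  fun_induction cdrLoop2 alpha i1 i2 with
  | case1 a i1 i2 h k1 k2 ih => simpa using ih
  | case2 => rfl

-- the first loop, elementwise: positions lo..hi hold the negated mirror image, the rest is untouched
theorem cdrLoop1_getD (alpha : List Int) (lo hi : Int) :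
    0 ≤ lo → hi < (alpha.length : Int) → ∀ j : Nat, j < alpha.length →
    (cdrLoop1 alpha lo hi).getD j 0 =
      if lo ≤ (j : Int) ∧ (j : Int) ≤ hi then -(alpha.getD (lo + hi - j).toNat 0)
      else alpha.getD j 0 := by
  fun_induction cdrLoop1 alpha lo hi with
  | case1 a lo hi h k1 k2 ih =>
    intro h0 hh j hj
    have hlo : lo.toNat < a.length := by omega
    have hhi : hi.toNat < a.length := by omega
    have hk1 : k1 = a.getD lo.toNat 0 := by
      rw [show k1 = (PySem.List.pyGet? a lo).getD 0 from rfl,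
        PySem.List.pyGet?_of_nonneg a h0, List.getD_eq_getElem?_getD]
    have hk2 : k2 = a.getD hi.toNat 0 := by
      rw [show k2 = (PySem.List.pyGet? a hi).getD 0 from rfl,
        PySem.List.pyGet?_of_nonneg a (by omega : (0:Int) ≤ hi), List.getD_eq_getElem?_getD]
    have hlen : ((a.set lo.toNat (-k2)).set hi.toNat (-k1)).length = a.length := by simp
    have hset : ∀ m : Nat, ((a.set lo.toNat (-k2)).set hi.toNat (-k1)).getD m 0 =
        if m = hi.toNat then -k1 else if m = lo.toNat then -k2 else a.getD m 0 := by
      intro m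
      rw [getD_set_int _ _ _ _ (by simpa using hhi)]
      by_cases h1 : m = hi.toNat
      · rw [if_pos h1, if_pos h1]
      · rw [if_neg h1, if_neg h1, getD_set_int _ _ _ _ hlo]
    rw [ih (by omega) (by rw [hlen]; omega) j (by rw [hlen]; omega)]
    by_cases hout : lo ≤ (j : Int) ∧ (j : Int) ≤ hi
    · rw [if_pos hout]
      by_cases hmid : lo + 1 ≤ (j : Int) ∧ (j : Int) ≤ hi - 1
      · rw [if_pos hmid, show lo + 1 + (hi - 1) - (j:Int) = lo + hi - j by ring,
          hset, if_neg (by omega), if_neg (by omega)]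
      · rw [if_neg hmid, hset]
        by_cases hjhi : (j : Int) = hi
        · rw [if_pos (by omega), hk1, show (lo + hi - (j:Int)).toNat = lo.toNat by omega]
        · rw [if_neg (by omega), if_pos (by omega), hk2,
            show (lo + hi - (j:Int)).toNat = hi.toNat by omega]
    · rw [if_neg hout, if_neg (by omega), hset, if_neg (by omega), if_neg (by omega)]
  | case2 a lo hi h =>
    intro h0 hh j hj
    rw [if_neg (by omega)]

-- the second loop computes the same elementwise result (its high pointer is the first argument)
theorem cdrLoop2_getD (alpha : List Int) (hi lo : Int) :
    0 ≤ lo → hi < (alpha.length : Int) → ∀ j : Nat, j < alpha.length →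
    (cdrLoop2 alpha hi lo).getD j 0 =
      if lo ≤ (j : Int) ∧ (j : Int) ≤ hi then -(alpha.getD (lo + hi - j).toNat 0)
      else alpha.getD j 0 := by
  fun_induction cdrLoop2 alpha hi lo with
  | case1 a hi lo h k1 k2 ih =>
    intro h0 hh j hj
    have hlo : lo.toNat < a.length := by omega
    have hhi : hi.toNat < a.length := by omega
    have hk1 : k1 = a.getD hi.toNat 0 := by
      rw [show k1 = (PySem.List.pyGet? a hi).getD 0 from rfl,
        PySem.List.pyGet?_of_nonneg a (by omega : (0:Int) ≤ hi), List.getD_eq_getElem?_getD]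
    have hk2 : k2 = a.getD lo.toNat 0 := by
      rw [show k2 = (PySem.List.pyGet? a lo).getD 0 from rfl,
        PySem.List.pyGet?_of_nonneg a h0, List.getD_eq_getElem?_getD]
    have hlen : ((a.set hi.toNat (-k2)).set lo.toNat (-k1)).length = a.length := by simp
    have hset : ∀ m : Nat, ((a.set hi.toNat (-k2)).set lo.toNat (-k1)).getD m 0 =
        if m = lo.toNat then -k1 else if m = hi.toNat then -k2 else a.getD m 0 := by
      intro m
      rw [getD_set_int _ _ _ _ (by simpa using hlo)]
      by_cases h1 : m = lo.toNat
      · rw [if_pos h1, if_pos h1]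
      · rw [if_neg h1, if_neg h1, getD_set_int _ _ _ _ hhi]
    rw [ih (by omega) (by rw [hlen]; omega) j (by rw [hlen]; omega)]
    by_cases hout : lo ≤ (j : Int) ∧ (j : Int) ≤ hi
    · rw [if_pos hout]
      by_cases hmid : lo + 1 ≤ (j : Int) ∧ (j : Int) ≤ hi - 1
      · rw [if_pos hmid, show lo + 1 + (hi - 1) - (j:Int) = lo + hi - j by ring,
          hset, if_neg (by omega), if_neg (by omega)]
      · rw [if_neg hmid, hset]
        by_cases hjlo : (j : Int) = lo
        · rw [if_pos (by omega), hk1, show (lo + hi - (j:Int)).toNat = hi.toNat by omega]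
        · rw [if_neg (by omega), if_pos (by omega), hk2,
            show (lo + hi - (j:Int)).toNat = lo.toNat by omega]
    · rw [if_neg hout, if_neg (by omega), hset, if_neg (by omega), if_neg (by omega)]
  | case2 a hi lo h =>
    intro h0 hh j hj
    rw [if_neg (by omega)]

-- B's rebuilt list, elementwise: the same description
theorem concat_getD (alpha : List Int) (lo hi j : Nat) (hlo : lo ≤ hi)
    (hhi : hi < alpha.length) (hj : j < alpha.length) :
    (alpha.take lo ++ ((alpha.drop lo).take (hi + 1 - lo)).reverse.map (fun x => -x)
      ++ alpha.drop (hi + 1)).getD j 0 =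
      if lo ≤ j ∧ j ≤ hi then -(alpha.getD (lo + hi - j) 0) else alpha.getD j 0 := by
  have hseg : ((alpha.drop lo).take (hi + 1 - lo)).length = hi + 1 - lo := by
    simp
    omega
  simp only [List.getD_eq_getElem?_getD]
  by_cases h1 : j < lo
  · rw [if_neg (by omega), List.getElem?_append_left (by simp; omega),
      List.getElem?_append_left (by simp; omega), List.getElem?_take, if_pos h1]
  · by_cases h2 : j ≤ hi
    · rw [if_pos ⟨by omega, h2⟩,
        List.getElem?_append_left (by simp; omega),
        List.getElem?_append_right (by simp; omega)]
      simp only [List.length_take, List.getElem?_map]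
      rw [List.getElem?_reverse (by rw [hseg]; omega), hseg,
        List.getElem?_take, if_pos (by omega), List.getElem?_drop]
      rw [show lo + (hi + 1 - lo - 1 - (j - min lo alpha.length)) = lo + hi - j by omega]
      cases alpha[lo + hi - j]? <;> simp
    · rw [if_neg (by omega), List.getElem?_append_right (by simp; omega),
        List.getElem?_drop,
        show hi + 1 + (j - (alpha.take lo ++ ((alpha.drop lo).take (hi + 1 - lo)).reverse.map
            (fun x => -x)).length) = j from by
          simp only [List.length_append, List.length_take, List.length_map,
            List.length_reverse, hseg]
          omega]

theorem slice_succ (alpha : List Int) (lo hi : Nat) :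
    PySem.List.slice alpha (some (lo : Int)) (some ((hi : Int) + 1)) =
      (alpha.drop lo).take (hi + 1 - lo) := by
  rw [show ((hi : Int) + 1) = ((hi + 1 : Nat) : Int) by push_cast; ring,
    PySem.List.slice_natCast]

theorem concat_length (alpha : List Int) (lo hi : Nat) (hlo : lo ≤ hi)
    (hhi : hi < alpha.length) :
    (alpha.take lo ++ ((alpha.drop lo).take (hi + 1 - lo)).reverse.map (fun x => -x)
      ++ alpha.drop (hi + 1)).length = alpha.length := by
  simp
  omega

-- ===== VERDICT (by name: the statement is the Claim_ definition above) =====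
theorem cdr_spec : Claim_equal_cdr := by
  intro alpha a1 a2 _ hpre
  obtain ⟨h1, h2, hne⟩ := hpre
  unfold Spec_cdr
  obtain ⟨i1, hA1⟩ := Option.isSome_iff_exists.mp
    ((PySem.List.index?_isSome_iff alpha a1).mpr h1)
  obtain ⟨i2, hA2⟩ := Option.isSome_iff_exists.mp
    ((PySem.List.index?_isSome_iff alpha a2).mpr h2)
  obtain ⟨hl1, hget1, -⟩ := PySem.List.getElem_of_index?_eq_some hA1
  obtain ⟨hl2, hget2, -⟩ := PySem.List.getElem_of_index?_eq_some hA2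
  have hne12 : i1 ≠ i2 := by
    intro e
    exact hne (by rw [← hget1, ← hget2]; congr 1)
  simp only [cdr, cdr_alt, hA1, hA2, if_neg hne12]
  by_cases hc : i2 > i1
  · rw [if_pos (by exact_mod_cast hc), if_pos hc, if_pos hc, slice_succ]
    apply ext_getD
    · rw [cdrLoop1_length, concat_length alpha (i1 + 1) i2 (by omega) hl2]
    · intro j hj
      rw [cdrLoop1_length] at hj
      rw [cdrLoop1_getD alpha ((i1 : Int) + 1) (i2 : Int) (by omega) (by omega) j hj,
        concat_getD alpha (i1 + 1) i2 j (by omega) hl2 hj]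
      by_cases hin : i1 + 1 ≤ j ∧ j ≤ i2
      · rw [if_pos (by omega), if_pos hin,
          show ((i1 : Int) + 1 + i2 - j).toNat = i1 + 1 + i2 - j by omega]
      · rw [if_neg (by omega), if_neg hin]
  · rw [if_neg (by omega), if_pos (by omega), if_neg hc, if_neg hc, slice_succ]
    have hi1 : i2 < i1 := by omega
    apply ext_getD
    · rw [cdrLoop2_length, concat_length alpha i2 (i1 - 1) (by omega) (by omega)]
    · intro j hj
      rw [cdrLoop2_length] at hj
      rw [cdrLoop2_getD alpha ((i1 : Int) - 1) (i2 : Int) (by omega) (by omega) j hj,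
        concat_getD alpha i2 (i1 - 1) j (by omega) (by omega) hj]
      by_cases hin : i2 ≤ j ∧ j ≤ i1 - 1
      · rw [if_pos (by omega), if_pos hin,
          show ((i2 : Int) + ((i1 : Int) - 1) - j).toNat = i2 + (i1 - 1) - j by omega]
      · rw [if_neg (by omega), if_neg hin]
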